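-- pv_equiv track=rewrite | github.com/greenmaid/adventofcode2022 | day14/day14.py | get_max_xy
-- ===== SOURCE A (Python) =====
-- from typing import Tuple, Set
--
-- def get_max_xy(rocks: Set[Tuple[int, int]]) -> Tuple[int, int]:
--     max_x = 0
--     max_y = 0
--     for r in rocks:
--         if r[0] > max_x:
--             max_x = r[0]
--         if r[1] > max_y:
--             max_y = r[1]
--     return (max_x, max_y)
-- ===== SOURCE B (Python) =====
-- from typing import Tuple, Set
--
-- def get_max_xy(rocks: Set[Tuple[int, int]]) -> Tuple[int, int]:
--     max_x = max((r[0] for r in rocks), default=0)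
--     max_y = max((r[1] for r in rocks), default=0)
--     return (max(0, max_x), max(0, max_y))
-- ===== Notes on version B (the rewrite author's own statement) =====
-- stated objective: simpler
-- what changed: Replaces A's single fused loop maintaining two running maxima with two independent max() passes, one per coordinate, floored at 0.
import Mathlib
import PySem

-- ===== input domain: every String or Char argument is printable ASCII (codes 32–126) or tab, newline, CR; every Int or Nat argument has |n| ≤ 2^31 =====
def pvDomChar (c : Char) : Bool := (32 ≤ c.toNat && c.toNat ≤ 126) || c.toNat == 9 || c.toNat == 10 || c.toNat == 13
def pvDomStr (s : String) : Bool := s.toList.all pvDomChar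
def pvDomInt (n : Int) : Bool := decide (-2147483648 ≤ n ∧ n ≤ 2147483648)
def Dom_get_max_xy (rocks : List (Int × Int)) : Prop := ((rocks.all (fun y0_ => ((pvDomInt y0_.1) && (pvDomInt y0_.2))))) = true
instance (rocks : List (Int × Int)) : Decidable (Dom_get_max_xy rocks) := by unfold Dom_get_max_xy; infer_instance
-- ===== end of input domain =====

-- B replaces A's single fused loop (two running maxima) with two independent
-- per-coordinate max passes floored at 0; objective: simpler.

-- ===== PORT A =====
def get_max_xy (rocks : List (Int × Int)) : Int × Int :=
  let s := rocks.foldl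
    (fun s r =>
      let s := if r.1 > s.1 then (r.1, s.2) else s
      if r.2 > s.2 then (s.1, r.2) else s)
    (0, 0)
  s

-- ===== PORT B =====
-- Python max(gen, default=d): first element as seed, fold max over the rest
def pyMaxD (xs : List Int) (d : Int) : Int :=
  match xs with
  | [] => d
  | h :: t => t.foldl max h

def get_max_xy_alt (rocks : List (Int × Int)) : Int × Int :=
  let max_x := pyMaxD (rocks.map (fun r => r.1)) 0
  let max_y := pyMaxD (rocks.map (fun r => r.2)) 0
  (max 0 max_x, max 0 max_y)

-- ===== PRECONDITION & SPEC =====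
def Spec_get_max_xy (rocks : List (Int × Int)) (out : Int × Int) : Prop := out = get_max_xy_alt rocks
instance (rocks : List (Int × Int)) (out : Int × Int) : Decidable (Spec_get_max_xy rocks out) := by unfold Spec_get_max_xy; infer_instance

-- ===== CLAIM (what is proved, stated in full; the proofs are below) =====
def Claim_equal_get_max_xy : Prop := ∀ (rocks : List (Int × Int)), Dom_get_max_xy rocks → Spec_get_max_xy rocks (get_max_xy rocks)

-- ===== LEMMAS AND PROOFS =====

theorem foldl_max_max (l : List Int) (a b : Int) :
    l.foldl max (max a b) = max a (l.foldl max b) := by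
  induction l generalizing b with
  | nil => simp
  | cons c t ih =>
    simp only [List.foldl_cons, max_assoc, ih]

theorem pyMaxD_eq (xs : List Int) : max 0 (pyMaxD xs 0) = xs.foldl max 0 := by
  cases xs with
  | nil => simp [pyMaxD]
  | cons h t =>
    simp only [pyMaxD, List.foldl_cons]
    rw [← foldl_max_max]

theorem foldA_eq (l : List (Int × Int)) (a b : Int) :
    l.foldl
      (fun s r =>
        let s := if r.1 > s.1 then (r.1, s.2) else s
        if r.2 > s.2 then (s.1, r.2) else s)
      (a, b)
    = ((l.map (fun r => r.1)).foldl max a, (l.map (fun r => r.2)).foldl max b) := by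
  induction l generalizing a b with
  | nil => simp
  | cons r t ih =>
    simp only [List.foldl_cons, List.map_cons]
    rw [← ih]
    congr 1
    rcases r with ⟨x, y⟩
    simp only [max_def]
    split_ifs <;> simp_all <;> omega

-- ===== VERDICT (by name: the statement is the Claim_ definition above) =====
theorem get_max_xy_spec : Claim_equal_get_max_xy := by
  intro rocks _
  unfold Spec_get_max_xy get_max_xy get_max_xy_alt
  simp only [foldA_eq, pyMaxD_eq]
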